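-- pv_equiv track=rewrite | github.com/CDMY0417/Tool_MATH | function_tools/function_total/qeot4b.py | integer_partitions_with_fixed_length
-- ===== SOURCE A (Python) =====
-- def integer_partitions_with_fixed_length(n: int, k: int):
--     if k > n:
--         return []
--     if k == 1:
--         return [(n,)]
--     partitions = []
--     for i in range(n, 0, -1):
--         for subpartition in integer_partitions_with_fixed_length(n-i, k-1):
--             if subpartition and i >= subpartition[0]:
--                 partitions.append((i,) + subpartition)
--     return partitions
-- ===== SOURCE B (Python) =====
-- def integer_partitions_with_fixed_length(n: int, k: int):
--     if k <= 0 or k > n: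
--         return []
--     return _bounded_partitions(n, k, n)
--
-- def _bounded_partitions(remaining, parts, maxpart):
--     # partitions of `remaining` into exactly `parts` non-increasing positive
--     # parts, each at most `maxpart`, in lexicographically descending order.
--     # Callers guarantee parts >= 1, parts <= remaining <= parts * maxpart,
--     # so every branch below emits only valid partitions (no filtering).
--     if parts <= 1:
--         return [(remaining,)]
--     out = []
--     lo = -((-remaining) // parts)          # ceil(remaining / parts)
--     hi = min(maxpart, remaining - parts + 1)
--     for i in range(hi, lo - 1, -1):
--         for s in _bounded_partitions(remaining - i, parts - 1, i):
--             out.append((i,) + s)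
--     return out
-- ===== Notes on version B (the rewrite author's own statement) =====
-- stated objective: alternative
-- what changed: B replaces A's recursion that tries every first part i from n down to 1 and discards invalid sub-partitions by post-filtering with a bounded recursion whose loop range (from min(maxpart, remaining-parts+1) down to ceil(remaining/parts)) only ever generates valid partitions, so no filtering step exists.
import Mathlib
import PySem

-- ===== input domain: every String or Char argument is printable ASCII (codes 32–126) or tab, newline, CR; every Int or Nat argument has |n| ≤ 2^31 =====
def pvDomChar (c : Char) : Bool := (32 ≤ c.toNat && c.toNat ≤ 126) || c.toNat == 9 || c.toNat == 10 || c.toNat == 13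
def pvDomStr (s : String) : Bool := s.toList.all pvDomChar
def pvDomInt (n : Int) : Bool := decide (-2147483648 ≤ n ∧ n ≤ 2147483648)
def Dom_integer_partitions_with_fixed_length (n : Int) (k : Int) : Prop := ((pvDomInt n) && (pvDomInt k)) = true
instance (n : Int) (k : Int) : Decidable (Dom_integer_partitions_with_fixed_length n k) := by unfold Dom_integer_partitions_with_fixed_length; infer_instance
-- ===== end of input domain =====

-- B replaces A's generate-all-and-filter recursion by a bounded recursion (max-part bound and
-- ceiling lower bound on each part) that only ever emits valid partitions, never filtering.

-- ===== PORT A =====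
def integer_partitions_with_fixed_length (n : Int) (k : Int) : List (List Int) :=
  if k > n then []
  else if k = 1 then [[n]]
  else
    (PySem.List.pyRange n 0 (-1)).attach.foldl
      (fun partitions i =>
        (integer_partitions_with_fixed_length (n - i.1) (k - 1)).foldl
          (fun acc sub =>
            if sub ≠ [] ∧ i.1 ≥ sub.head! then acc ++ [i.1 :: sub] else acc)
          partitions)
      []
termination_by n.toNat
decreasing_by
  have h := (PySem.List.mem_pyRange_neg_one).mp i.2
  omega

-- ===== PORT B =====
def pvBoundedPartitions (remaining : Int) (parts : Int) (maxpart : Int) : List (List Int) :=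
  if parts ≤ 1 then [[remaining]]
  else
    let lo := -(PySem.Int.floordiv (-remaining) parts)
    let hi := min maxpart (remaining - parts + 1)
    (PySem.List.pyRange hi (lo - 1) (-1)).foldl
      (fun out i =>
        (pvBoundedPartitions (remaining - i) (parts - 1) i).foldl
          (fun acc s => acc ++ [i :: s]) out)
      []
termination_by parts.toNat
decreasing_by omega

def integer_partitions_with_fixed_length_alt (n : Int) (k : Int) : List (List Int) :=
  if k ≤ 0 ∨ k > n then []
  else pvBoundedPartitions n k n

-- ===== PRECONDITION & SPEC =====
def Spec_integer_partitions_with_fixed_length (n : Int) (k : Int) (out : List (List Int)) : Prop := out = integer_partitions_with_fixed_length_alt n k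
instance (n : Int) (k : Int) (out : List (List Int)) : Decidable (Spec_integer_partitions_with_fixed_length n k out) := by unfold Spec_integer_partitions_with_fixed_length; infer_instance

-- ===== CLAIM (what is proved, stated in full; the proofs are below) =====
def Claim_equal_integer_partitions_with_fixed_length : Prop := ∀ (n : Int) (k : Int), Dom_integer_partitions_with_fixed_length n k → Spec_integer_partitions_with_fixed_length n k (integer_partitions_with_fixed_length n k)

-- ===== LEMMAS AND PROOFS =====

theorem pvA_eq_nil_of_gt (n k : Int) (h : k > n) :
    integer_partitions_with_fixed_length n k = [] := by
  rw [integer_partitions_with_fixed_length, if_pos h]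

/-- A's body, for `k ≤ n`, `k ≠ 1`, written as a flatMap of filtered recursive results. -/
theorem pvA_eq_flatMap (n k : Int) (h1 : ¬ k > n) (h2 : ¬ k = 1) :
    integer_partitions_with_fixed_length n k =
      (PySem.List.pyRange n 0 (-1)).flatMap (fun i =>
        ((integer_partitions_with_fixed_length (n - i) (k - 1)).filter
          (fun sub => decide (sub ≠ [] ∧ i ≥ sub.head!))).map (fun sub => i :: sub)) := by
  rw [integer_partitions_with_fixed_length, if_neg h1, if_neg h2]
  simp only [PySem.List.foldl_append_ite,
    PySem.List.foldl_append_eq_flatMap, List.nil_append]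
  rw [List.flatMap_subtype
    (g := fun i => List.map (fun sub => i :: sub)
      (List.filter (fun sub => decide (sub ≠ [] ∧ i ≥ sub.head!))
        (integer_partitions_with_fixed_length (n - i) (k - 1))))
    (fun x h => rfl), List.unattach_attach]

theorem pvA_eq_nil_of_nonpos_aux :
    ∀ (m : Nat) (n k : Int), n.toNat ≤ m → k ≤ 0 →
      integer_partitions_with_fixed_length n k = [] := by
  intro m
  induction m with
  | zero =>
    intro n k hm hk
    by_cases hgt : k > n
    · exact pvA_eq_nil_of_gt n k hgt
    · rw [pvA_eq_flatMap n k hgt (by omega),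
        PySem.List.pyRange_neg_one_eq_nil (by omega : n ≤ (0:Int))]
      simp
  | succ m ih =>
    intro n k hm hk
    by_cases hgt : k > n
    · exact pvA_eq_nil_of_gt n k hgt
    · rw [pvA_eq_flatMap n k hgt (by omega)]
      apply List.flatMap_eq_nil_iff.mpr
      intro i hi
      have hmem := PySem.List.mem_pyRange_neg_one.mp hi
      rw [ih (n - i) (k - 1) (by omega) (by omega)]
      simp

theorem pvA_eq_nil_of_nonpos (n k : Int) (hk : k ≤ 0) :
    integer_partitions_with_fixed_length n k = [] :=
  pvA_eq_nil_of_nonpos_aux n.toNat n k le_rfl hk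

theorem pvMem_A_aux :
    ∀ (m : Nat) (n k : Int) (p : List Int), n.toNat ≤ m → 1 ≤ k →
      p ∈ integer_partitions_with_fixed_length n k →
      ∃ h t, p = h :: t ∧ 1 ≤ h ∧ n ≤ k * h ∧ h ≤ n - k + 1 := by
  intro m
  induction m with
  | zero =>
    intro n k p hm hk hp
    by_cases hgt : k > n
    · rw [pvA_eq_nil_of_gt n k hgt] at hp; simp at hp
    · omega
  | succ m ih =>
    intro n k p hm hk hp
    by_cases hgt : k > n
    · rw [pvA_eq_nil_of_gt n k hgt] at hp; simp at hp
    · by_cases hk1 : k = 1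
      · subst hk1
        rw [integer_partitions_with_fixed_length, if_neg hgt, if_pos rfl] at hp
        simp at hp
        exact ⟨n, [], hp, by omega, by omega, by omega⟩
      · rw [pvA_eq_flatMap n k hgt hk1] at hp
        rcases List.mem_flatMap.mp hp with ⟨i, hi, hpi⟩
        have hmem := PySem.List.mem_pyRange_neg_one.mp hi
        rcases List.mem_map.mp hpi with ⟨sub, hsub, rfl⟩
        have hsub' := List.mem_filter.mp hsub
        have hcond : sub ≠ [] ∧ i ≥ sub.head! := of_decide_eq_true hsub'.2
        rcases ih (n - i) (k - 1) sub (by omega) (by omega) hsub'.1 with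
          ⟨h', t', rfl, hh1, hh2, hh3⟩
        refine ⟨i, h' :: t', rfl, by omega, ?_, by omega⟩
        have hle : h' ≤ i := by
          have := hcond.2; simp [List.head!] at this; omega
        nlinarith
-- (statement-form wrapper)
theorem pvMem_A (n k : Int) (p : List Int) (hk : 1 ≤ k)
    (hp : p ∈ integer_partitions_with_fixed_length n k) :
    ∃ h t, p = h :: t ∧ 1 ≤ h ∧ n ≤ k * h ∧ h ≤ n - k + 1 :=
  pvMem_A_aux n.toNat n k p le_rfl hk hp

theorem pvG_eq_flatMap (r k mp : Int) (h : ¬ k ≤ 1) :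
    pvBoundedPartitions r k mp =
      (PySem.List.pyRange (min mp (r - k + 1)) (-(PySem.Int.floordiv (-r) k) - 1) (-1)).flatMap
        (fun i => (pvBoundedPartitions (r - i) (k - 1) i).map (fun s => i :: s)) := by
  rw [pvBoundedPartitions, if_neg h]
  simp only [PySem.List.foldl_append_singleton_eq_map,
    PySem.List.foldl_append_eq_flatMap, List.nil_append]

theorem pvFlatMap_countdown_high (F : Int → List (List Int)) :
    ∀ (m : Nat) (a hi : Int), (a - hi).toNat ≤ m → hi ≤ a →
      (∀ i, hi < i → i ≤ a → F i = []) →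
      (PySem.List.pyRange a 0 (-1)).flatMap F = (PySem.List.pyRange hi 0 (-1)).flatMap F := by
  intro m
  induction m with
  | zero =>
    intro a hi hm hha _
    have : a = hi := by omega
    rw [this]
  | succ m ih =>
    intro a hi hm hha hz
    by_cases heq : a = hi
    · rw [heq]
    · have hlt : hi < a := by omega
      by_cases hpos : 0 < a
      · rw [PySem.List.pyRange_neg_one_cons hpos, List.flatMap_cons,
          hz a hlt le_rfl, List.nil_append]
        exact ih (a - 1) hi (by omega) (by omega) (fun i h1 h2 => hz i h1 (by omega))
      · rw [PySem.List.pyRange_neg_one_eq_nil (by omega : a ≤ (0:Int)),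
          PySem.List.pyRange_neg_one_eq_nil (by omega : hi ≤ (0:Int))]
  
theorem pvFlatMap_countdown_low (F : Int → List (List Int)) :
    ∀ (m : Nat) (a lo : Int), a.toNat ≤ m → 1 ≤ lo →
      (∀ i, 0 < i → i < lo → F i = []) →
      (PySem.List.pyRange a 0 (-1)).flatMap F = (PySem.List.pyRange a (lo - 1) (-1)).flatMap F := by
  intro m
  induction m with
  | zero =>
    intro a lo hm hlo hz
    rw [PySem.List.pyRange_neg_one_eq_nil (by omega : a ≤ (0:Int)),
      PySem.List.pyRange_neg_one_eq_nil (by omega : a ≤ lo - 1)]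
  | succ m ih =>
    intro a lo hm hlo hz
    by_cases hsmall : a ≤ lo - 1
    · rw [PySem.List.pyRange_neg_one_eq_nil hsmall]
      apply List.flatMap_eq_nil_iff.mpr
      intro i hi
      have hmem := PySem.List.mem_pyRange_neg_one.mp hi
      exact hz i (by omega) (by omega)
    · rw [PySem.List.pyRange_neg_one_cons (by omega : (0:Int) < a),
        PySem.List.pyRange_neg_one_cons (by omega : lo - 1 < a),
        List.flatMap_cons, List.flatMap_cons]
      rw [ih (a - 1) lo (by omega) hlo hz]

theorem pvG_eq_filter_A_aux :
    ∀ (m : Nat) (k n c : Int), k.toNat ≤ m → 1 ≤ k → k ≤ n → n ≤ k * c →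
      pvBoundedPartitions n k c =
        (integer_partitions_with_fixed_length n k).filter (fun p => decide (p.head! ≤ c)) := by
  intro m
  induction m with
  | zero => intro k n c hm hk _ _; omega
  | succ m ih =>
    intro k n c hm hk hkn hkc
    by_cases hk1 : k = 1
    · subst hk1
      rw [pvBoundedPartitions, if_pos le_rfl]
      rw [integer_partitions_with_fixed_length, if_neg (by omega), if_pos rfl]
      have hnc : n ≤ c := by omega
      simp [List.head!, hnc]
    · have hkpos : (0:Int) < k := by omega
      rw [pvG_eq_flatMap n k c (by omega)]
      rw [pvA_eq_flatMap n k (by omega) hk1]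
      rw [List.filter_flatMap]
      set lo : Int := -(PySem.Int.floordiv (-n) k) with hlo
      set hi : Int := min c (n - k + 1) with hhi
      set F : Int → List (List Int) := fun i =>
        List.filter (fun p => decide (p.head! ≤ c))
          (List.map (fun sub => i :: sub)
            (List.filter (fun sub => decide (sub ≠ [] ∧ i ≥ sub.head!))
              (integer_partitions_with_fixed_length (n - i) (k - 1)))) with hF
      have key : ∀ i : Int, lo ≤ i ↔ n ≤ i * k := by
        intro i
        have h := PySem.Int.le_floordiv_iff_mul_le (a := -n) (b := k) (q := -i) hkpos
        rw [neg_mul] at h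
        constructor
        · intro h1
          have h2 : -i ≤ PySem.Int.floordiv (-n) k := by omega
          linarith [h.mp h2]
        · intro h1
          have h2 := h.mpr (by linarith)
          omega
      have hlo1 : 1 ≤ lo := by
        have h0 := key 0
        simp at h0
        omega
      have hz1 : ∀ i, hi < i → i ≤ n → F i = [] := by
        intro i h1 h2
        simp only [hF]
        by_cases hc : i ≤ c
        · rw [pvA_eq_nil_of_gt (n - i) (k - 1) (by omega)]
          simp
        · apply List.filter_eq_nil_iff.mpr
          intro p hp
          rcases List.mem_map.mp hp with ⟨sub, _, rfl⟩
          simp [List.head!]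
          omega
      have hz2 : ∀ i, 0 < i → i < lo → F i = [] := by
        intro i h1 h2
        simp only [hF]
        have hn_gt : ¬ n ≤ i * k := fun hle => absurd ((key i).mpr hle) (by omega)
        have hnil : List.filter (fun sub => decide (sub ≠ [] ∧ i ≥ sub.head!))
            (integer_partitions_with_fixed_length (n - i) (k - 1)) = [] := by
          apply List.filter_eq_nil_iff.mpr
          intro sub hs hdec
          have hc := of_decide_eq_true hdec
          rcases pvMem_A (n - i) (k - 1) sub (by omega) hs with ⟨h', t', rfl, hh1, hh2, hh3⟩
          have hhi' : h' ≤ i := by simpa [List.head!] using hc.2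
          apply hn_gt
          nlinarith
        rw [hnil]
        simp
      rw [pvFlatMap_countdown_high F (n - hi).toNat n hi le_rfl (by omega) hz1,
        pvFlatMap_countdown_low F hi.toNat hi lo le_rfl hlo1 hz2]
      rw [List.flatMap_def, List.flatMap_def]
      apply congrArg List.flatten
      apply List.map_congr_left
      intro i hi_mem
      have hmem := PySem.List.mem_pyRange_neg_one.mp hi_mem
      have hilo : lo ≤ i := by omega
      have hic : i ≤ c := by omega
      have hn_i : n ≤ i * k := (key i).mp hilo
      rw [ih (k - 1) (n - i) i (by omega) (by omega) (by omega) (by nlinarith)]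
      simp only [hF]
      rw [List.filter_map]
      have h1 : List.filter ((fun p => decide (p.head! ≤ c)) ∘ fun sub => i :: sub)
          (List.filter (fun sub => decide (sub ≠ [] ∧ i ≥ sub.head!))
            (integer_partitions_with_fixed_length (n - i) (k - 1))) =
          List.filter (fun sub => decide (sub ≠ [] ∧ i ≥ sub.head!))
            (integer_partitions_with_fixed_length (n - i) (k - 1)) :=
        List.filter_eq_self.mpr (by intro sub _; simp [Function.comp, List.head!, hic])
      rw [h1]
      apply congrArg
      apply List.filter_congr
      intro sub hs
      rcases pvMem_A (n - i) (k - 1) sub (by omega) hs with ⟨h', t', rfl, _, _, _⟩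
      simp [List.head!]

theorem pvMain (n k : Int) :
    integer_partitions_with_fixed_length n k = integer_partitions_with_fixed_length_alt n k := by
  unfold integer_partitions_with_fixed_length_alt
  by_cases h0 : k ≤ 0 ∨ k > n
  · rw [if_pos h0]
    rcases h0 with h | h
    · exact pvA_eq_nil_of_nonpos n k h
    · exact pvA_eq_nil_of_gt n k h
  · rw [if_neg h0]
    push Not at h0
    obtain ⟨hk, hkn⟩ := h0
    rw [pvG_eq_filter_A_aux k.toNat k n n le_rfl (by omega) hkn (by nlinarith)]
    symm
    apply List.filter_eq_self.mpr
    intro p hp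
    rcases pvMem_A n k p (by omega) hp with ⟨h, t, rfl, h1, h2, h3⟩
    simp [List.head!]
    omega

-- ===== VERDICT (by name: the statement is the Claim_ definition above) =====
theorem integer_partitions_with_fixed_length_spec : Claim_equal_integer_partitions_with_fixed_length := by
  intro n k _
  exact pvMain n k
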